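-- pv_equiv track=rewrite | github.com/sdfrew2/stuff | aoc2020/14/day14b.py | parseJokers
-- ===== SOURCE A (Python) =====
-- def parseJokers(s):
--     result = [(0, 0)]
--     for (i, c) in enumerate(s):
--         if s[i] == 'X':
--             result2 = []
--             for (a, b) in result:
--                 result2.append((a | (1 << (len(s) - 1- i)), b))
--                 result2.append((a, b | (1 << (len(s) - 1 -i))))
--             result = result2
--     return result
-- ===== SOURCE B (Python) =====
-- def parseJokers(s):
--     bits = [1 << (len(s) - 1 - i) for i, c in enumerate(s) if c == 'X']
--
--     def combos(bs):
--         if not bs: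
--             return [(0, 0)]
--         bit = bs[0]
--         tails = combos(bs[1:])
--         return [(a | bit, b) for a, b in tails] + [(a, b | bit) for a, b in tails]
--
--     return combos(bits)
-- ===== Notes on version B (the rewrite author's own statement) =====
-- stated objective: alternative
-- what changed: Replaces A's incremental list-doubling inside the character loop by a two-phase decomposition: first collect the bit values of the X positions, then a structural recursion over that bit list builds all (a,b) assignments (a-variant block first), preserving A's exact output order.
import Mathlib
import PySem

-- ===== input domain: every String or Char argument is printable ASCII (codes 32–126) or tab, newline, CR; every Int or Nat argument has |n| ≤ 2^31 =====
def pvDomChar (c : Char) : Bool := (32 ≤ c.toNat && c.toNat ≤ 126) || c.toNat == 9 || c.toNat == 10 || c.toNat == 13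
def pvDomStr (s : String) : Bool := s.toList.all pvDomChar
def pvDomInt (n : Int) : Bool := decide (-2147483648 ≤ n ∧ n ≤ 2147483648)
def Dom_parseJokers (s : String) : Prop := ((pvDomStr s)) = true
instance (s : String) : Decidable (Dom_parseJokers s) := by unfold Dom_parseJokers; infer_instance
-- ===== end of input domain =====

-- B enumerates the wildcard assignments by first collecting the X-position bit values and then
-- recursing over that list (same cost, different decomposition); return values agree with A everywhere.

-- ===== PORT A =====
-- literal port of A: fold over enumerate(s); `s[i]` is PySem.Str.pyGet? (always in range here, i
-- comes from enumerate); `1 << (len(s)-1-i)` is `(1:Int) <<< k.toNat`, exact since len(s)-1-i ≥ 0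
-- for every index enumerate produces.
def parseJokers (s : String) : List (Int × Int) :=
  (PySem.List.enumerate s.toList).foldl
    (fun result ic =>
      if PySem.Str.pyGet? s ic.1 = some 'X' then
        result.foldl
          (fun result2 ab =>
            result2 ++ [(PySem.Int.bor ab.1 ((1 : Int) <<< (PySem.Str.len s - 1 - ic.1).toNat), ab.2)]
              ++ [(ab.1, PySem.Int.bor ab.2 ((1 : Int) <<< (PySem.Str.len s - 1 - ic.1).toNat))])
          []
      else result)
    [(0, 0)]

-- ===== PORT B =====
-- port of Source B's recursive `combos` helper
def pvCombos : List Int → List (Int × Int)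
  | [] => [(0, 0)]
  | bit :: rest =>
      let tails := pvCombos rest
      tails.map (fun ab => (PySem.Int.bor ab.1 bit, ab.2)) ++
        tails.map (fun ab => (ab.1, PySem.Int.bor ab.2 bit))

-- port of Source B: the `bits` comprehension (filter + map over enumerate(s)), then combos
def parseJokers_alt (s : String) : List (Int × Int) :=
  pvCombos
    (((PySem.List.enumerate s.toList).filter (fun ic => ic.2 == 'X')).map
      (fun ic => (1 : Int) <<< (PySem.Str.len s - 1 - ic.1).toNat))

-- ===== PRECONDITION & SPEC =====
def Spec_parseJokers (s : String) (out : List (Int × Int)) : Prop := out = parseJokers_alt s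
instance (s : String) (out : List (Int × Int)) : Decidable (Spec_parseJokers s out) := by unfold Spec_parseJokers; infer_instance

-- ===== CLAIM (what is proved, stated in full; the proofs are below) =====
def Claim_equal_parseJokers : Prop := ∀ (s : String), Dom_parseJokers s → Spec_parseJokers s (parseJokers s)

-- ===== LEMMAS AND PROOFS =====

-- the doubling step of A, abstracted over the bit value
def pvDf (bit : Int) (ab : Int × Int) : List (Int × Int) :=
  [(PySem.Int.bor ab.1 bit, ab.2), (ab.1, PySem.Int.bor ab.2 bit)]

def pvStep (r : List (Int × Int)) (bit : Int) : List (Int × Int) := r.flatMap (pvDf bit)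

theorem pvBorNonneg {a b : Int} (ha : 0 ≤ a) (hb : 0 ≤ b) : 0 ≤ PySem.Int.bor a b := by
  rw [PySem.Int.bor_of_nonneg ha hb]; exact Int.natCast_nonneg _

theorem pvBorZeroLeft (a : Int) : PySem.Int.bor 0 a = a := by
  rw [PySem.Int.bor_comm]; exact PySem.Int.bor_zero a

theorem pvBorAssoc (a b c : Int) (ha : 0 ≤ a) (hb : 0 ≤ b) (hc : 0 ≤ c) :
    PySem.Int.bor (PySem.Int.bor a b) c = PySem.Int.bor a (PySem.Int.bor b c) := by
  rw [PySem.Int.bor_of_nonneg ha hb, PySem.Int.bor_of_nonneg hb hc,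
      PySem.Int.bor_of_nonneg (Int.natCast_nonneg _) hc,
      PySem.Int.bor_of_nonneg ha (Int.natCast_nonneg _)]
  simp [Nat.lor_assoc]

theorem pvFoldAppend (bs : List Int) : ∀ (r1 r2 : List (Int × Int)),
    bs.foldl pvStep (r1 ++ r2) = bs.foldl pvStep r1 ++ bs.foldl pvStep r2 := by
  induction bs with
  | nil => intro r1 r2; rfl
  | cons b bs ih =>
      intro r1 r2
      simp only [List.foldl_cons]
      rw [show pvStep (r1 ++ r2) b = pvStep r1 b ++ pvStep r2 b from List.flatMap_append .., ih]

-- all pairs produced from a nonneg start by nonneg bits stay nonneg componentwise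
theorem pvFoldNonneg (bs : List Int) : ∀ (init : List (Int × Int)),
    (∀ b ∈ bs, 0 ≤ b) → (∀ ab ∈ init, 0 ≤ ab.1 ∧ 0 ≤ ab.2) →
    ∀ ab ∈ bs.foldl pvStep init, 0 ≤ ab.1 ∧ 0 ≤ ab.2 := by
  induction bs with
  | nil => intro init _ hinit ab hab; exact hinit ab hab
  | cons b bs ih =>
      intro init hbs hinit ab hab
      refine ih (pvStep init b) (fun x hx => hbs x (List.mem_cons_of_mem _ hx)) ?_ ab hab
      intro x hx
      rcases List.mem_flatMap.mp hx with ⟨y, hy, hxy⟩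
      have hb : 0 ≤ b := hbs b (List.mem_cons_self ..)
      have hy' := hinit y hy
      simp only [pvDf, List.mem_cons] at hxy
      rcases hxy with rfl | rfl | h
      · exact ⟨pvBorNonneg hy'.1 hb, hy'.2⟩
      · exact ⟨hy'.1, pvBorNonneg hy'.2 hb⟩
      · cases h

theorem pvShift (bs : List Int) : ∀ (x y : Int), (∀ b ∈ bs, 0 ≤ b) → 0 ≤ x → 0 ≤ y →
    bs.foldl pvStep [(x, y)] =
      (bs.foldl pvStep [(0, 0)]).map (fun ab => (PySem.Int.bor x ab.1, PySem.Int.bor y ab.2)) := by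
  induction bs with
  | nil => intro x y _ _ _; simp
  | cons b bs ih =>
      intro x y hbs hx hy
      have hb : 0 ≤ b := hbs b (List.mem_cons_self ..)
      have hbs' : ∀ c ∈ bs, 0 ≤ c := fun c hc => hbs c (List.mem_cons_of_mem _ hc)
      have h1 : pvStep [(x, y)] b
          = [(PySem.Int.bor x b, y)] ++ [(x, PySem.Int.bor y b)] := by
        simp [pvStep, pvDf]
      have h0 : pvStep [((0 : Int), (0 : Int))] b = [(b, 0)] ++ [(0, b)] := by
        simp [pvStep, pvDf, pvBorZeroLeft]
      simp only [List.foldl_cons, h1, h0, pvFoldAppend]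
      rw [ih (PySem.Int.bor x b) y hbs' (pvBorNonneg hx hb) hy,
          ih x (PySem.Int.bor y b) hbs' hx (pvBorNonneg hy hb),
          ih b 0 hbs' hb le_rfl, ih 0 b hbs' le_rfl hb]
      simp only [List.map_append, List.map_map]
      have hmem := pvFoldNonneg bs [(0, 0)] hbs' (by simp)
      congr 1
      · refine List.map_congr_left (fun ab hab => ?_)
        have h := hmem ab hab
        simp only [Function.comp_apply, pvBorZeroLeft]
        exact Prod.ext (pvBorAssoc x b ab.1 hx hb h.1) rfl
      · refine List.map_congr_left (fun ab hab => ?_)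
        have h := hmem ab hab
        simp only [Function.comp_apply, pvBorZeroLeft]
        exact Prod.ext rfl (pvBorAssoc y b ab.2 hy hb h.2)

-- the foldl-doubling over a list of nonneg bit values equals B's recursion
theorem pvCombosEq (bs : List Int) (h : ∀ b ∈ bs, 0 ≤ b) :
    bs.foldl pvStep [(0, 0)] = pvCombos bs := by
  induction bs with
  | nil => rfl
  | cons b bs ih =>
      have hb : 0 ≤ b := h b (List.mem_cons_self ..)
      have hbs' : ∀ c ∈ bs, 0 ≤ c := fun c hc => h c (List.mem_cons_of_mem _ hc)
      have h0 : pvStep [((0 : Int), (0 : Int))] b = [(b, 0)] ++ [(0, b)] := by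
        simp [pvStep, pvDf, pvBorZeroLeft]
      simp only [List.foldl_cons, h0, pvFoldAppend]
      rw [pvShift bs b 0 hbs' hb le_rfl, pvShift bs 0 b hbs' le_rfl hb, ih hbs']
      simp only [pvCombos]
      congr 1
      · exact List.map_congr_left fun ab _ => by
          simp [PySem.Int.bor_comm]
      · exact List.map_congr_left fun ab _ => by
          simp [PySem.Int.bor_comm]

theorem pvShiftOneNonneg (k : Nat) : 0 ≤ (1 : Int) <<< k := by
  rw [Int.shiftLeft_eq]; positivity

-- two .append's per source pair = flatMap of the two-element block
theorem pvInnerFlat (f g : Int × Int → Int × Int) (r : List (Int × Int)) : ∀ acc,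
    r.foldl (fun r2 ab => r2 ++ [f ab] ++ [g ab]) acc = acc ++ r.flatMap (fun ab => [f ab, g ab]) := by
  induction r with
  | nil => intro acc; simp
  | cons a r ih => intro acc; simp [List.flatMap_def]

-- a guarded fold = fold over the filtered-and-mapped list (B's `bits` comprehension)
theorem pvFoldlFilterMap {α β σ : Type} (p : α → Bool) (f : α → β) (g : σ → β → σ) :
    ∀ (l : List α) (init : σ),
      l.foldl (fun r x => if p x then g r (f x) else r) init = ((l.filter p).map f).foldl g init := by
  intro l
  induction l with
  | nil => intro init; rfl
  | cons a l ih => intro init; by_cases h : p a <;> simp [h, ih]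

-- A's enumerate-fold equals the pvStep-fold over the extracted bit list
theorem pvAfold (s : String) :
    parseJokers s =
      ((((PySem.List.enumerate s.toList).filter (fun ic => ic.2 == 'X')).map
        (fun ic => (1 : Int) <<< (PySem.Str.len s - 1 - ic.1).toNat)).foldl pvStep [(0, 0)]) := by
  unfold parseJokers
  rw [PySem.List.foldl_congr_mem _ _
    (fun r ic =>
      if ic.2 == 'X' then pvStep r ((1 : Int) <<< (PySem.Str.len s - 1 - ic.1).toNat) else r)
    _
    (by
      intro acc ic hic
      rcases (PySem.List.mem_enumerate_iff _ _ _).mp hic with ⟨k, hk, rfl⟩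
      simp only [zero_add, PySem.Str.pyGet?_natCast, List.getElem?_eq_getElem hk,
        Option.some_inj, beq_iff_eq]
      split_ifs with h
      · rw [pvInnerFlat]; rfl
      · rfl)]
  exact pvFoldlFilterMap _ _ _ _ _

theorem parseJokers_spec : Claim_equal_parseJokers := by
  intro s _
  unfold Spec_parseJokers parseJokers_alt
  rw [pvAfold s, pvCombosEq]
  intro b hb
  simp only [List.mem_map] at hb
  rcases hb with ⟨ic, _, rfl⟩
  exact pvShiftOneNonneg _
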